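-- pv_equiv track=rewrite | github.com/EthanDudeGuy/Packet-Looker | packet_class.py | read_in_packet
-- ===== SOURCE A (Python) =====
-- def read_in_packet(input_string):
--     lst = []
--     clean_list = []
--     for one_byte in input_string:
--         if one_byte in ["\n", " "]:  # Skip newlines and spaces
--             continue
--         lst.append([one_byte])
--     for item in lst:
--         clean_list.append(item[0])
--     return clean_list
-- ===== SOURCE B (Python) =====
-- def read_in_packet(input_string):
--     cleaned = input_string.replace("\n", "").replace(" ", "")
--     return list(cleaned)
-- ===== Notes on version B (the rewrite author's own statement) =====
-- stated objective: idiomatic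
-- what changed: Replaces A's per-character loop building singleton lists plus a second unwrap loop with two whole-string replace() passes followed by list(); no intermediate wrapped list.
import Mathlib
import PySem

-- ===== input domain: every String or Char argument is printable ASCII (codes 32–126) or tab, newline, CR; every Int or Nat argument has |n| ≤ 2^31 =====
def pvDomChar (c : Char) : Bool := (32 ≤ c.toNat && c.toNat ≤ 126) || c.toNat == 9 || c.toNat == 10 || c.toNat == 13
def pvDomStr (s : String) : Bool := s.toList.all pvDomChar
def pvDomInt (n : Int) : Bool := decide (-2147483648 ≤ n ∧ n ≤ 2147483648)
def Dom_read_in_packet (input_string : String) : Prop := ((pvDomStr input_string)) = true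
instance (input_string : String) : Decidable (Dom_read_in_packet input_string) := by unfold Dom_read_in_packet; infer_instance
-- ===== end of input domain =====

-- B chains two whole-string replace() passes and splits into characters, instead of A's
-- per-character loop building singleton lists plus a second unwrap loop (idiomatic).

-- ===== PORT A =====
-- A: first loop appends [one_byte] for each char not in ["\n", " "]; second loop appends item[0].
-- item[0] always exists (every item is a singleton), so the .getD "" default is never used.
def read_in_packet (input_string : String) : List String :=
  let lst : List (List String) :=
    input_string.toList.foldl
      (fun lst c =>
        if c ∈ ['\n', ' '] then lst
        else lst ++ [[String.ofList [c]]]) []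
  lst.foldl (fun clean_list item => clean_list ++ [(PySem.List.pyGet? item 0).getD ""]) []

-- ===== PORT B =====
def read_in_packet_alt (input_string : String) : List String :=
  let cleaned := PySem.Str.replace (PySem.Str.replace input_string "\n" "") " " ""
  cleaned.toList.map (fun c => String.ofList [c])

-- ===== PRECONDITION & SPEC =====
def Spec_read_in_packet (input_string : String) (out : List String) : Prop := out = read_in_packet_alt input_string
instance (input_string : String) (out : List String) : Decidable (Spec_read_in_packet input_string out) := by unfold Spec_read_in_packet; infer_instance

-- ===== CLAIM (what is proved, stated in full; the proofs are below) =====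
def Claim_equal_read_in_packet : Prop := ∀ (input_string : String), Dom_read_in_packet input_string → Spec_read_in_packet input_string (read_in_packet input_string)

-- ===== LEMMAS AND PROOFS =====

-- A's first loop builds the wrapped filtered list.
theorem pvFoldA (cs : List Char) (acc : List (List String)) :
    cs.foldl
      (fun lst c =>
        if c ∈ ['\n', ' '] then lst
        else lst ++ [[String.ofList [c]]]) acc
    = acc ++ (cs.filter (fun c => ¬ (c = '\n' ∨ c = ' '))).map (fun c => [String.ofList [c]]) := by
  induction cs generalizing acc with
  | nil => simp
  | cons c t ih =>
    simp only [List.foldl_cons, List.filter_cons]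
    by_cases h : c = '\n' ∨ c = ' '
    · have hm : c ∈ ['\n', ' '] := by simpa using h
      rw [if_pos hm, ih]
      simp [h]
    · have hm : c ∉ ['\n', ' '] := by simpa using h
      rw [if_neg hm, ih]
      simp [h]

-- A's second loop unwraps: it is append-map of item[0] (with default).
theorem pvFoldA2 (items : List (List String)) (acc : List String) :
    items.foldl (fun clean_list item => clean_list ++ [(PySem.List.pyGet? item 0).getD ""]) acc
    = acc ++ items.map (fun item => (PySem.List.pyGet? item 0).getD "") := by
  induction items generalizing acc with
  | nil => simp
  | cons i t ih => simp [ih]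

-- replace with a one-char pattern and empty replacement is a filter.
theorem pvGoSingle (a : Char) (fuel : Nat) (l acc : List Char) (h : l.length ≤ fuel) :
    PySem.Chars.replace.go [a] [] fuel l acc = acc.reverse ++ l.filter (· ≠ a) := by
  induction fuel generalizing l acc with
  | zero =>
    interval_cases hl : l.length
    · rw [List.length_eq_zero_iff] at hl; subst hl; simp [PySem.Chars.replace.go]
  | succ n ih =>
    cases l with
    | nil => simp [PySem.Chars.replace.go]
    | cons c t =>
      simp only [PySem.Chars.replace.go]
      by_cases hc : c = a
      · subst hc
        have : List.isPrefixOf [c] (c :: t) = true := by simp [List.isPrefixOf]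
        rw [if_pos this]
        simp only [List.length_cons] at h
        simp only [List.length_singleton, List.drop_succ_cons, List.drop_zero,
          List.reverse_nil, List.nil_append]
        rw [ih t acc (by omega)]
        simp
      · have : List.isPrefixOf [a] (c :: t) = false := by
          simp [List.isPrefixOf]; exact fun hac => hc hac.symm
        rw [if_neg (by simp [this])]
        simp only [List.length_cons] at h
        rw [ih t (c :: acc) (by omega)]
        simp [hc]

theorem pvReplaceSingle (cs : List Char) (a : Char) :
    PySem.Chars.replace cs [a] [] = cs.filter (· ≠ a) := by
  rw [PySem.Chars.replace]
  simp only [List.isEmpty_cons, Bool.false_eq_true, if_false]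
  exact pvGoSingle a cs.length cs [] le_rfl

-- ===== VERDICT (by name: the statement is the Claim_ definition above) =====
theorem read_in_packet_spec : Claim_equal_read_in_packet := by
  intro s _
  show _ = _
  unfold read_in_packet read_in_packet_alt
  simp only [pvFoldA, pvFoldA2, List.nil_append, List.map_map, PySem.Str.toList_replace]
  rw [show ("".toList) = ([] : List Char) from rfl,
    show ("\n".toList) = ['\n'] from rfl, pvReplaceSingle,
    show (" ".toList) = [' '] from rfl, pvReplaceSingle,
    List.filter_filter]
  congr 1
  apply List.filter_congr
  intro c _
  by_cases h1 : c = '\n' <;> by_cases h2 : c = ' ' <;> simp [h1, h2]
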